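-- pv_equiv track=rewrite | github.com/aditya-srikanth/Hierarchical-Self-Attention-Network | tensorflow/vocab_builder.py | get_aspect_chunks
-- ===== SOURCE A (Python) =====
-- from copy import deepcopy
--
-- def get_aspect_chunks(labels):
--   """
--   Merge consecutive I's with the preceeding B to get an aspect term
--   Args:
--     labels (list): List of labels of words in a given sentence
--   Returns:
--     a_terms (list): list of aspect terms. each aspect term is list of indices of
--       words corresponding to aspect term
--     non_a_terms (list): list of indices corresponding to non aspect terms
--   """
--   a_terms = []
--   non_a_terms = []
--   curr_term = []
--   chunk_start = False
--   for i, e in enumerate(labels):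
--     if not chunk_start:
--       if e == 1 or e == 2:
--         chunk_start = True
--         curr_term.append(i)
--         continue
--     else:
--       if e == 0:
--         a_terms.append(deepcopy(curr_term))
--         curr_term = []
--         chunk_start = False
--       elif e == 2:
--         curr_term.append(i)
--       elif e == 1:
--         a_terms.append(deepcopy(curr_term))
--         curr_term = []
--         curr_term.append(i)
--   if curr_term:
--     a_terms.append(deepcopy(curr_term))
--   for i, _ in enumerate(labels):
--     if not any(i in terms for terms in a_terms):
--       non_a_terms.append(i)
--   return a_terms, non_a_terms
-- ===== SOURCE B (Python) =====
-- def get_aspect_chunks(labels):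
--   a_terms = []
--   non_a_terms = []
--   curr = []
--   for i, e in enumerate(labels):
--     if e == 1:
--       if curr:
--         a_terms.append(curr)
--       curr = [i]
--     elif e == 2:
--       curr.append(i)
--     elif e == 0:
--       if curr:
--         a_terms.append(curr)
--         curr = []
--       non_a_terms.append(i)
--     else:
--       non_a_terms.append(i)
--   if curr:
--     a_terms.append(curr)
--   return a_terms, non_a_terms
-- ===== Notes on version B (the rewrite author's own statement) =====
-- stated objective: simpler
-- what changed: Single forward pass maintaining only the open chunk, classifying each index into a chunk or non_a_terms as it is seen, instead of A's two passes where the second re-scans every produced chunk for each index.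
import Mathlib
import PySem

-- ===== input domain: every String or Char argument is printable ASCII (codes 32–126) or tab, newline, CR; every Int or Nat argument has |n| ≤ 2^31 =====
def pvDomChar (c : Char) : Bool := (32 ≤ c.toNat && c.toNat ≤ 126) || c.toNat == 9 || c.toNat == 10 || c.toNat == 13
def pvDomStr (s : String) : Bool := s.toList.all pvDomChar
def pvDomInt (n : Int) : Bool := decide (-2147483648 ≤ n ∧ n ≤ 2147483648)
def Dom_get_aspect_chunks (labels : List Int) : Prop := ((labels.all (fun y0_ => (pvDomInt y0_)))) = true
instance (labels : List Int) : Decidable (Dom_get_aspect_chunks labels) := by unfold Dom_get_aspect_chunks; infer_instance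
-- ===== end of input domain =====

-- B replaces A's two passes (build chunks, then re-scan all chunks for every index) by one
-- forward pass that also collects non-chunk indices as it goes.

-- ===== PORT A =====
-- first loop of A: state (a_terms, curr_term, chunk_start), index i runs over enumerate(labels)
def aLoop : List Int → Int → List (List Int) → List Int → Bool → List (List Int) × List Int × Bool
  | [], _, acc, curr, cs => (acc, curr, cs)
  | e :: rest, i, acc, curr, cs =>
    if !cs then
      if e = 1 ∨ e = 2 then aLoop rest (i+1) acc (curr ++ [i]) true
      else aLoop rest (i+1) acc curr cs
    else
      if e = 0 then aLoop rest (i+1) (acc ++ [curr]) [] false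
      else if e = 2 then aLoop rest (i+1) acc (curr ++ [i]) cs
      else if e = 1 then aLoop rest (i+1) (acc ++ [curr]) [i] cs
      else aLoop rest (i+1) acc curr cs

-- second loop of A: collect i with not any(i in terms for terms in a_terms)
def aFilter : List Int → Int → List (List Int) → List Int
  | [], _, _ => []
  | _ :: rest, i, chunks =>
    if !(chunks.any (fun t => t.contains i)) then i :: aFilter rest (i+1) chunks
    else aFilter rest (i+1) chunks

def get_aspect_chunks (labels : List Int) : List (List Int) × List Int :=
  let r := aLoop labels 0 [] [] false
  let a_terms := if r.2.1.isEmpty then r.1 else r.1 ++ [r.2.1]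
  (a_terms, aFilter labels 0 a_terms)

-- ===== PORT B =====
-- B's single loop: state (a_terms, non_a_terms, curr); the trailing non-empty curr is closed at the end
def bLoop : List Int → Int → List (List Int) → List Int → List Int → List (List Int) × List Int
  | [], _, acc, na, curr => ((if curr.isEmpty then acc else acc ++ [curr]), na)
  | e :: rest, i, acc, na, curr =>
    if e = 1 then bLoop rest (i+1) (if curr.isEmpty then acc else acc ++ [curr]) na [i]
    else if e = 2 then bLoop rest (i+1) acc na (curr ++ [i])
    else if e = 0 then bLoop rest (i+1) (if curr.isEmpty then acc else acc ++ [curr]) (na ++ [i]) []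
    else bLoop rest (i+1) acc (na ++ [i]) curr

def get_aspect_chunks_alt (labels : List Int) : List (List Int) × List Int :=
  bLoop labels 0 [] [] []

-- ===== PRECONDITION & SPEC =====
def Spec_get_aspect_chunks (labels : List Int) (out : List (List Int) × List Int) : Prop := out = get_aspect_chunks_alt labels
instance (labels : List Int) (out : List (List Int) × List Int) : Decidable (Spec_get_aspect_chunks labels out) := by unfold Spec_get_aspect_chunks; infer_instance

-- ===== CLAIM (what is proved, stated in full; the proofs are below) =====
def Claim_equal_get_aspect_chunks : Prop := ∀ (labels : List Int), Dom_get_aspect_chunks labels → Spec_get_aspect_chunks labels (get_aspect_chunks labels)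

-- ===== LEMMAS AND PROOFS =====

-- indices (offset i) whose label is not 1/2, in order: what B's non_a_terms accumulates
def naSpec : List Int → Int → List Int
  | [], _ => []
  | e :: rest, i => if e = 1 ∨ e = 2 then naSpec rest (i+1) else i :: naSpec rest (i+1)

-- the chunk component of bLoop, with closing of the trailing curr
def bChunks (acc : List (List Int)) (curr : List Int) : List (List Int) :=
  if curr.isEmpty then acc else acc ++ [curr]

-- A's loop (with chunk_start = "curr nonempty") computes the same chunks as B's loop
theorem aLoop_eq_bLoop : ∀ (rest : List Int) (i : Int) (acc : List (List Int)) (na curr : List Int),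
    (let r := aLoop rest i acc curr (!curr.isEmpty)
     bChunks r.1 r.2.1) = (bLoop rest i acc na curr).1 := by
  intro rest
  induction rest with
  | nil => intro i acc na curr; simp [aLoop, bLoop, bChunks]
  | cons e rest ih =>
    intro i acc na curr
    simp only [aLoop, bLoop]
    by_cases hc : curr.isEmpty
    · have hc' : curr = [] := by simpa [List.isEmpty_iff] using hc
      subst hc'
      by_cases h1 : e = 1
      · simpa [h1, bChunks] using ih (i+1) acc na [i]
      · by_cases h2 : e = 2
        · simpa [h1, h2, bChunks] using ih (i+1) acc na [i]
        · by_cases h0 : e = 0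
          · simpa [h0, h1, h2, bChunks] using ih (i+1) acc (na ++ [i]) []
          · simpa [h0, h1, h2, bChunks] using ih (i+1) acc (na ++ [i]) []
    · have hne : (!curr.isEmpty) = true := by simp [hc]
      simp only [hc]
      by_cases h0 : e = 0
      · simpa [h0, bChunks, hc] using ih (i+1) (acc ++ [curr]) (na ++ [i]) []
      · by_cases h2 : e = 2
        · have : (curr ++ [i]).isEmpty = false := by simp
          simpa [h0, h2, bChunks, hc, this] using ih (i+1) acc na (curr ++ [i])
        · by_cases h1 : e = 1
          · simpa [h0, h1, h2, bChunks, hc] using ih (i+1) (acc ++ [curr]) na [i]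
          · simpa [h0, h1, h2, bChunks, hc] using ih (i+1) acc (na ++ [i]) curr

-- B's non_a_terms component is the accumulator followed by naSpec
theorem bLoop_snd : ∀ (rest : List Int) (i : Int) (acc : List (List Int)) (na curr : List Int),
    (bLoop rest i acc na curr).2 = na ++ naSpec rest i := by
  intro rest
  induction rest with
  | nil => intro i acc na curr; simp [bLoop, naSpec]
  | cons e rest ih =>
    intro i acc na curr
    simp only [bLoop, naSpec]
    by_cases h1 : e = 1
    · simp [h1, ih]
    · by_cases h2 : e = 2
      · simp [h1, h2, ih]
      · by_cases h0 : e = 0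
        · simp [h1, h2, h0, ih]
        · simp [h1, h2, h0, ih]

-- indices (offset i) whose label IS 1 or 2
def naSpecCompl : List Int → Int → List Int
  | [], _ => []
  | e :: rest, i => if e = 1 ∨ e = 2 then i :: naSpecCompl rest (i+1) else naSpecCompl rest (i+1)

theorem any_bChunks (acc : List (List Int)) (curr : List Int) (j : Int) :
    ((bChunks acc curr).any (fun t => t.contains j) = true)
      ↔ ((acc.any (fun t => t.contains j) = true) ∨ j ∈ curr) := by
  by_cases hc : curr.isEmpty
  · have hc' : curr = [] := by simpa [List.isEmpty_iff] using hc
    subst hc'; simp [bChunks]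
  · simp [bChunks, hc]

-- membership in B's final chunks: an old index, or a suffix index with label 1/2
theorem mem_bLoop_chunks : ∀ (rest : List Int) (i : Int) (acc : List (List Int)) (na curr : List Int) (j : Int),
    ((bLoop rest i acc na curr).1.any (fun t => t.contains j) = true)
      ↔ (acc.any (fun t => t.contains j) = true ∨ j ∈ curr ∨ j ∈ naSpecCompl rest i) := by
  intro rest
  induction rest with
  | nil =>
    intro i acc na curr j
    have : (bLoop [] i acc na curr).1 = bChunks acc curr := rfl
    rw [this, any_bChunks]
    simp [naSpecCompl]
  | cons e rest ih =>
    intro i acc na curr j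
    simp only [bLoop, naSpecCompl]
    by_cases h1 : e = 1
    · rw [if_pos h1, if_pos (Or.inl h1)]
      rw [show (if curr.isEmpty then acc else acc ++ [curr]) = bChunks acc curr from rfl]
      rw [ih, any_bChunks]
      simp only [List.mem_cons, List.not_mem_nil]
      tauto
    · by_cases h2 : e = 2
      · rw [if_neg h1, if_pos h2, if_pos (Or.inr h2)]
        rw [ih]
        simp only [List.mem_append, List.mem_cons]
        tauto
      · have hne : ¬ (e = 1 ∨ e = 2) := by tauto
        rw [if_neg h1, if_neg h2, if_neg hne]
        by_cases h0 : e = 0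
        · rw [if_pos h0]
          rw [show (if curr.isEmpty then acc else acc ++ [curr]) = bChunks acc curr from rfl]
          rw [ih, any_bChunks]
          simp only [List.not_mem_nil]
          tauto
        · rw [if_neg h0, ih]

-- the indices collected by naSpecCompl are at least the offset
theorem mem_naSpecCompl_ge : ∀ (rest : List Int) (i j : Int), j ∈ naSpecCompl rest i → i ≤ j := by
  intro rest
  induction rest with
  | nil => intro i j h; simp [naSpecCompl] at h
  | cons e rest ih =>
    intro i j h
    simp only [naSpecCompl] at h
    by_cases he : e = 1 ∨ e = 2
    · rw [if_pos he] at h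
      rcases List.mem_cons.mp h with h | h
      · omega
      · have := ih _ _ h; omega
    · rw [if_neg he] at h
      have := ih _ _ h; omega

-- A's second loop equals naSpec when the chunk test agrees with naSpecCompl membership
theorem aFilter_eq_naSpec : ∀ (rest : List Int) (i : Int) (C : List (List Int)),
    (∀ j : Int, i ≤ j → ((C.any (fun t => t.contains j) = true) ↔ j ∈ naSpecCompl rest i)) →
    aFilter rest i C = naSpec rest i := by
  intro rest
  induction rest with
  | nil => intro i C h; simp [aFilter, naSpec]
  | cons e rest ih =>
    intro i C h
    have hhead := h i (le_refl i)
    have hmem : (i ∈ naSpecCompl (e :: rest) i) ↔ (e = 1 ∨ e = 2) := by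
      simp only [naSpecCompl]
      by_cases he : e = 1 ∨ e = 2
      · simp [he]
      · simp only [if_neg he]
        constructor
        · intro hm; exact absurd (mem_naSpecCompl_ge _ _ _ hm) (by omega)
        · intro hm; exact absurd hm he
    have htail : ∀ j : Int, i + 1 ≤ j →
        ((C.any (fun t => t.contains j) = true) ↔ j ∈ naSpecCompl rest (i+1)) := by
      intro j hj
      rw [h j (by omega)]
      simp only [naSpecCompl]
      by_cases he : e = 1 ∨ e = 2
      · rw [if_pos he]
        have hji : j ≠ i := by omega
        simp [hji]
      · rw [if_neg he]
    simp only [aFilter, naSpec]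
    by_cases he : e = 1 ∨ e = 2
    · have hb : (C.any (fun t => t.contains i)) = true := hhead.mpr (hmem.mpr he)
      rw [hb]
      simp [he, ih _ _ htail]
    · have hb : (C.any (fun t => t.contains i)) = false := by
        rcases Bool.eq_false_or_eq_true (C.any (fun t => t.contains i)) with ht | hf
        · exact absurd (hmem.mp (hhead.mp ht)) he
        · exact hf
      rw [hb]
      simp [he, ih _ _ htail]

-- ===== VERDICT (by name: the statement is the Claim_ definition above) =====
theorem get_aspect_chunks_spec : Claim_equal_get_aspect_chunks := by
  intro labels _
  unfold Spec_get_aspect_chunks get_aspect_chunks get_aspect_chunks_alt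
  have e1 : (let r := aLoop labels 0 [] [] false
             if r.2.1.isEmpty then r.1 else r.1 ++ [r.2.1]) = (bLoop labels 0 [] [] []).1 := by
    simpa [bChunks] using aLoop_eq_bLoop labels 0 [] [] []
  have e2 : aFilter labels 0 (bLoop labels 0 [] [] []).1 = naSpec labels 0 := by
    apply aFilter_eq_naSpec
    intro j _
    simpa using mem_bLoop_chunks labels 0 [] [] [] j
  have e3 : (bLoop labels 0 [] [] []).2 = naSpec labels 0 := by
    simpa using bLoop_snd labels 0 [] [] []
  simp only []
  rw [e1, e2, ← e3]
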